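-- pv_equiv track=rewrite | github.com/jamesthegreati/WishlistOps | wishlistops/ai_client.py | _prefer_text_model
-- ===== SOURCE A (Python) =====
-- from typing import Optional, Any
--
-- def _prefer_text_model(model_names: list[str]) -> Optional[str]:
--     """Pick a reasonable default text model from a list of bare model ids."""
--     if not model_names:
--         return None
--
--     # Prefer fast/cheap general-purpose text models if present.
--     preferred_prefixes = [
--         "gemini-2.0-flash",
--         "gemini-2.0-pro",
--         "gemini-1.5-flash",
--         "gemini-1.5-pro",
--     ]
--     for pref in preferred_prefixes:
--         for name in model_names:
--             if name == pref or name.startswith(pref + "-"):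
--                 return name
--
--     # Fall back to first sorted to keep deterministic.
--     return sorted(model_names)[0]
-- ===== SOURCE B (Python) =====
-- from typing import Optional
--
-- _PREFERRED_PREFIXES = [
--     "gemini-2.0-flash",
--     "gemini-2.0-pro",
--     "gemini-1.5-flash",
--     "gemini-1.5-pro",
-- ]
--
--
-- def _rank(name: str) -> int:
--     """Index of the first preferred prefix that name matches, else len(prefixes)."""
--     for i, pref in enumerate(_PREFERRED_PREFIXES):
--         if name == pref or name.startswith(pref + "-"):
--             return i
--     return len(_PREFERRED_PREFIXES)
--
--
-- def _prefer_text_model(model_names: list[str]) -> Optional[str]: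
--     """Pick a reasonable default text model from a list of bare model ids."""
--     if not model_names:
--         return None
--     # min is stable: returns the first name at the lowest rank, matching the
--     # list-order tie-break of the nested-loop version.
--     best = min(model_names, key=_rank)
--     if _rank(best) < len(_PREFERRED_PREFIXES):
--         return best
--     # Fall back to first sorted to keep deterministic.
--     return sorted(model_names)[0]
-- ===== Notes on version B (the rewrite author's own statement) =====
-- stated objective: alternative
-- what changed: Replaces the prefix-priority nested loops (outer over prefixes, inner over names) with a rank helper and a single stable min(model_names, key=rank) pass, keeping the sorted()[0] fallback when no name matches.
import Mathlib
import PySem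

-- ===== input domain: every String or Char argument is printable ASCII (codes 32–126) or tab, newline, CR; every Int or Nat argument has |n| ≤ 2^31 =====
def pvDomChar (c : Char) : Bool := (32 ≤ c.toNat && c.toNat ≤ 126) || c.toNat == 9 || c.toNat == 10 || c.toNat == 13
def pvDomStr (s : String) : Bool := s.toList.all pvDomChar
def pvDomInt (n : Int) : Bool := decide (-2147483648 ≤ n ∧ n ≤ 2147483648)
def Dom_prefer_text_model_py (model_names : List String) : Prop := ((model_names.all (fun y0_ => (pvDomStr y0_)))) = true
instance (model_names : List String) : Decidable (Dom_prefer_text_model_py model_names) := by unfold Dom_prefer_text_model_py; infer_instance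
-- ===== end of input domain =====

-- B replaces A's prefix-priority nested loops by a rank helper and one stable
-- min-by-rank pass (objective: alternative decomposition, same cost).

-- ===== PORT A =====
-- the literal 'preferred_prefixes' list (same constant in A and B)
def pvPrefixes : List String :=
  ["gemini-2.0-flash", "gemini-2.0-pro", "gemini-1.5-flash", "gemini-1.5-pro"]

-- 'name == pref or name.startswith(pref + "-")' (the same test appears in A and in B)
def pvMatch (name pref : String) : Bool :=
  name == pref || PySem.Str.startswith name (pref ++ "-")

-- inner 'for name in model_names: if …: return name'
def pvInnerA (pref : String) : List String → Option String
  | [] => none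
  | n :: t => if pvMatch n pref then some n else pvInnerA pref t

-- outer 'for pref in preferred_prefixes'
def pvOuterA (names : List String) : List String → Option String
  | [] => none
  | p :: ps =>
    match pvInnerA p names with
    | some n => some n
    | none => pvOuterA names ps

def prefer_text_model_py (model_names : List String) : Option String :=
  if model_names.isEmpty then none
  else
    match pvOuterA model_names pvPrefixes with
    | some n => some n
    | none => PySem.List.pyGet? (PySem.List.sorted model_names (fun s => s)) 0

-- ===== PORT B =====
-- '_rank': loop over enumerate(prefixes), return i at the first match, else len(prefixes)
def pvRankGo (name : String) : List (Int × String) → Int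
  | [] => (pvPrefixes.length : Int)
  | (i, pref) :: t => if pvMatch name pref then i else pvRankGo name t

def pvRank (name : String) : Int := pvRankGo name (PySem.List.enumerate pvPrefixes)

def prefer_text_model_py_alt (model_names : List String) : Option String :=
  if model_names.isEmpty then none
  else
    match PySem.List.min? model_names pvRank with
    | none => none   -- unreachable: model_names is nonempty here
    | some best =>
      if pvRank best < (pvPrefixes.length : Int) then some best
      else PySem.List.pyGet? (PySem.List.sorted model_names (fun s => s)) 0

-- ===== PRECONDITION & SPEC =====
def Spec_prefer_text_model_py (model_names : List String) (out : Option String) : Prop := out = prefer_text_model_py_alt model_names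
instance (model_names : List String) (out : Option String) : Decidable (Spec_prefer_text_model_py model_names out) := by unfold Spec_prefer_text_model_py; infer_instance

-- ===== CLAIM (what is proved, stated in full; the proofs are below) =====
def Claim_equal_prefer_text_model_py : Prop := ∀ (model_names : List String), Dom_prefer_text_model_py model_names → Spec_prefer_text_model_py model_names (prefer_text_model_py model_names)

-- ===== LEMMAS AND PROOFS =====

-- A name's rank as a Nat: index of the first matching prefix, 4 if none matches
def pvRk (name : String) : Nat := pvPrefixes.findIdx (fun p => pvMatch name p)

lemma pvPrefixes_length : pvPrefixes.length = 4 := rfl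

lemma pvRk_le (name : String) : pvRk name ≤ 4 := by
  have h := @List.findIdx_le_length _ (fun p => pvMatch name p) pvPrefixes
  simpa [pvRk, pvPrefixes_length] using h

lemma pvRk_match (name : String) (h : pvRk name < 4) :
    pvMatch name (pvPrefixes[pvRk name]'(by simpa [pvPrefixes_length] using h)) = true := by
  exact List.findIdx_getElem

lemma pvRk_le_of_match (name : String) (j : Nat) (hj : j < 4)
    (h : pvMatch name (pvPrefixes[j]'(by simpa [pvPrefixes_length] using hj)) = true) :
    pvRk name ≤ j := by
  by_contra hlt
  rw [Nat.not_le] at hlt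
  have hf := List.not_of_lt_findIdx (p := fun p => pvMatch name p) (xs := pvPrefixes)
    (i := j) (by simpa [pvRk] using hlt)
  exact Bool.false_ne_true (hf.symm.trans h)

lemma pvRank_eq (name : String) : pvRank name = (pvRk name : Int) := by
  unfold pvRank pvRk pvPrefixes
  simp only [PySem.List.enumerate_cons, PySem.List.enumerate_nil, List.findIdx_cons]
  cases h0 : pvMatch name "gemini-2.0-flash" <;>
    cases h1 : pvMatch name "gemini-2.0-pro" <;>
      cases h2 : pvMatch name "gemini-1.5-flash" <;>
        cases h3 : pvMatch name "gemini-1.5-pro" <;>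
          simp [pvRankGo, h0, h1, h2, h3, pvPrefixes]

-- min? of a nonempty list is the plain min fold over the tail
lemma pvMin?_cons (key : String → Int) :
    ∀ (t : List String) (x : String),
      PySem.List.min? (x :: t) key
        = some (t.foldl (fun m y => if key y < key m then y else m) x) := by
  intro t
  induction t with
  | nil => intro x; rfl
  | cons y t ih =>
    intro x
    have h1 : PySem.List.min? (x :: y :: t) key
        = PySem.List.min? ((if key y < key x then y else x) :: t) key := by
      simp only [PySem.List.min?, List.foldl_cons]
      congr 1
      show (if key y < key x then some y else some x)
          = some (if key y < key x then y else x)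
      split_ifs <;> rfl
    rw [h1, ih]
    simp only [List.foldl_cons]

-- the min fold returns the FIRST element at the minimal key
lemma pvFold_min_first (key : String → Int) :
    ∀ (t : List String) (x : String),
      ∃ l1 l2,
        x :: t = l1 ++ (t.foldl (fun m y => if key y < key m then y else m) x) :: l2
        ∧ (∀ y ∈ l1, key (t.foldl (fun m y => if key y < key m then y else m) x) < key y)
        ∧ key (t.foldl (fun m y => if key y < key m then y else m) x) ≤ key x := by
  intro t
  induction t with
  | nil => intro x; exact ⟨[], [], rfl, by simp, le_refl _⟩
  | cons y t ih =>
    intro x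
    simp only [List.foldl_cons]
    by_cases h : key y < key x
    · simp only [if_pos h]
      obtain ⟨l1, l2, hdec, hl1, hle⟩ := ih y
      exact ⟨x :: l1, l2, by simpa using hdec,
        by
          intro z hz
          rcases List.mem_cons.mp hz with rfl | hz
          · exact lt_of_le_of_lt hle h
          · exact hl1 z hz,
        le_of_lt (lt_of_le_of_lt hle h)⟩
    · simp only [if_neg h]
      obtain ⟨l1, l2, hdec, hl1, hle⟩ := ih x
      cases l1 with
      | nil =>
        simp only [List.nil_append, List.cons.injEq] at hdec
        refine ⟨[], y :: t, ?_, by simp, hle⟩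
        simp only [List.nil_append]
        rw [← hdec.1]
      | cons z l1' =>
        have hz : z = x := by
          have := congrArg (fun l => l.head?) hdec
          simpa using this.symm
        subst hz
        have ht : t = l1' ++ (t.foldl (fun m y => if key y < key m then y else m) z) :: l2 := by
          simpa using hdec
        refine ⟨z :: y :: l1', l2, by simpa using ht, ?_, hle⟩
        intro w hw
        have hrz : key (t.foldl (fun m y => if key y < key m then y else m) z) < key z :=
          hl1 z (by simp)
        rcases List.mem_cons.mp hw with rfl | hw
        · exact hrz
        · rcases List.mem_cons.mp hw with rfl | hw
          · exact lt_of_lt_of_le hrz (not_lt.mp h)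
          · exact hl1 w (by simp [hw])

-- min? returns the first element at the minimal key (decomposition form)
lemma pvMin?_first (key : String → Int) (names : List String) (m : String)
    (hm : PySem.List.min? names key = some m) :
    ∃ l1 l2, names = l1 ++ m :: l2 ∧ ∀ y ∈ l1, key m < key y := by
  cases names with
  | nil => simp [PySem.List.min?] at hm
  | cons x t =>
    rw [pvMin?_cons] at hm
    rw [Option.some.injEq] at hm
    obtain ⟨l1, l2, hdec, hl1, -⟩ := pvFold_min_first key t x
    subst hm
    exact ⟨l1, l2, hdec, hl1⟩

lemma pvInner_none (p : String) :
    ∀ names : List String, (∀ n ∈ names, pvMatch n p = false) → pvInnerA p names = none := by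
  intro names
  induction names with
  | nil => intro _; rfl
  | cons n t ih =>
    intro h
    simp only [pvInnerA, h n (by simp)]
    simp only [Bool.false_eq_true, if_false]
    exact ih (fun x hx => h x (by simp [hx]))

lemma pvInner_first (p : String) :
    ∀ (l1 : List String) (m : String) (l2 : List String),
      pvMatch m p = true → (∀ y ∈ l1, pvMatch y p = false) →
      pvInnerA p (l1 ++ m :: l2) = some m := by
  intro l1
  induction l1 with
  | nil => intro m l2 hm _; simp [pvInnerA, hm]
  | cons z l1' ih =>
    intro m l2 hm hl
    simp only [List.cons_append, pvInnerA, hl z (by simp), Bool.false_eq_true, if_false]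
    exact ih m l2 hm (fun y hy => hl y (by simp [hy]))

lemma pvOuter_skip (names : List String) :
    ∀ ps1 ps2 : List String, (∀ p ∈ ps1, pvInnerA p names = none) →
      pvOuterA names (ps1 ++ ps2) = pvOuterA names ps2 := by
  intro ps1
  induction ps1 with
  | nil => intro ps2 _; rfl
  | cons p ps1' ih =>
    intro ps2 h
    simp only [List.cons_append, pvOuterA, h p (by simp)]
    exact ih ps2 (fun q hq => h q (by simp [hq]))

-- the heart of the equivalence: A's nested loops return exactly the first
-- name at the minimal rank when that rank names a prefix, and none otherwise
lemma pvOuter_eq_min (names : List String) (m : String)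
    (hm : PySem.List.min? names pvRank = some m) :
    pvOuterA names pvPrefixes = if pvRk m < 4 then some m else none := by
  have hmin : ∀ y ∈ names, pvRk m ≤ pvRk y := by
    intro y hy
    have := PySem.List.min?_isMin hm y hy
    rw [pvRank_eq, pvRank_eq] at this
    exact_mod_cast this
  obtain ⟨l1, l2, hdec, hl1⟩ := pvMin?_first pvRank names m hm
  have hl1' : ∀ y ∈ l1, pvRk m < pvRk y := by
    intro y hy
    have := hl1 y hy
    rw [pvRank_eq, pvRank_eq] at this
    exact_mod_cast this
  by_cases hK : pvRk m < 4
  · rw [if_pos hK]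
    have hKlen : pvRk m < pvPrefixes.length := by simpa [pvPrefixes_length] using hK
    have hsplit : pvPrefixes
        = pvPrefixes.take (pvRk m) ++ pvPrefixes[pvRk m] :: pvPrefixes.drop (pvRk m + 1) := by
      conv_lhs => rw [← List.take_append_drop (pvRk m) pvPrefixes]
      rw [List.drop_eq_getElem_cons hKlen]
    rw [hsplit, pvOuter_skip]
    · simp only [pvOuterA]
      rw [hdec, pvInner_first]
      · exact pvRk_match m hK
      · intro y hy
        by_contra hmatch
        rw [Bool.not_eq_false] at hmatch
        have h1 : pvRk y ≤ pvRk m := pvRk_le_of_match y (pvRk m) hK hmatch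
        have h2 : pvRk m < pvRk y := hl1' y hy
        omega
    · intro p hp
      obtain ⟨j, hj, hpj⟩ := List.mem_take_iff_getElem.mp hp
      apply pvInner_none
      intro n hn
      by_contra hmatch
      rw [Bool.not_eq_false] at hmatch
      rw [← hpj] at hmatch
      have hj4 : j < 4 := by
        have := hj; simp [pvPrefixes_length] at this; omega
      have h1 : pvRk n ≤ j := pvRk_le_of_match n j hj4 hmatch
      have h2 : pvRk m ≤ pvRk n := hmin n hn
      have h3 : j < pvRk m := by
        have := hj; simp [pvPrefixes_length] at this; omega
      omega
  · rw [if_neg hK]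
    have hall : ∀ n ∈ names, pvRk n = 4 := by
      intro n hn
      have h1 := pvRk_le n
      have h2 := hmin n hn
      have h3 := pvRk_le m
      omega
    have : pvOuterA names (pvPrefixes ++ []) = pvOuterA names [] := by
      apply pvOuter_skip
      intro p hp
      obtain ⟨j, hj, hpj⟩ := List.mem_iff_getElem.mp hp
      apply pvInner_none
      intro n hn
      by_contra hmatch
      rw [Bool.not_eq_false] at hmatch
      rw [← hpj] at hmatch
      have hj4 : j < 4 := by simpa [pvPrefixes_length] using hj
      have h1 : pvRk n ≤ j := pvRk_le_of_match n j hj4 hmatch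
      have h2 := hall n hn
      omega
    simpa using this

lemma pvMain (names : List String) :
    prefer_text_model_py names = prefer_text_model_py_alt names := by
  unfold prefer_text_model_py prefer_text_model_py_alt
  cases hne : names.isEmpty
  · simp only [Bool.false_eq_true, if_false]
    obtain ⟨m, hm⟩ : ∃ m, PySem.List.min? names pvRank = some m := by
      cases h : PySem.List.min? names pvRank with
      | none =>
        rw [PySem.List.min?_eq_none_iff] at h
        rw [h] at hne
        simp at hne
      | some m => exact ⟨m, rfl⟩
    rw [pvOuter_eq_min names m hm, hm]
    by_cases hK : pvRk m < 4
    · have hK' : pvRank m < (pvPrefixes.length : Int) := by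
        rw [pvRank_eq, pvPrefixes_length]
        exact_mod_cast hK
      simp [hK, hK']
    · have hK' : ¬ pvRank m < (pvPrefixes.length : Int) := by
        rw [pvRank_eq, pvPrefixes_length]
        exact_mod_cast hK
      simp [hK, hK']
  · simp

-- ===== VERDICT (by name: the statement is the Claim_ definition above) =====
theorem prefer_text_model_py_spec : Claim_equal_prefer_text_model_py := by
  intro model_names _
  unfold Spec_prefer_text_model_py
  exact pvMain model_names
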